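-- pv_equiv track=rewrite | github.com/rjavier97/Algo1.2C2023 | 2parcialTema1.py | pos_umbral
-- ===== SOURCE A (Python) =====
-- def pos_umbral(s: list, u: int) -> int:
--     res : int = 0
--     suma: int = 0
--     for i in range(len(s)):
--         if suma <= u and s[i]>=0 :
--             suma = suma + s[i]
--             res = i
--     if suma <= u :
--         res = -1
--     return res
-- ===== SOURCE B (Python) =====
-- def pos_umbral(s: list, u: int) -> int:
--     # Phase 1: one pass building parallel lists of the original indices of the
--     # non-negative elements and the running prefix sums over them (nondecreasing).
--     idxs = []
--     pref = []
--     t = 0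
--     for i, v in enumerate(s):
--         if v >= 0:
--             t += v
--             idxs.append(i)
--             pref.append(t)
--     # Phase 2: binary search for the first prefix sum strictly greater than u.
--     lo, hi = 0, len(pref)
--     while lo < hi:
--         mid = (lo + hi) // 2
--         if pref[mid] > u:
--             hi = mid
--         else:
--             lo = mid + 1
--     return idxs[lo] if lo < len(idxs) else -1
-- ===== Notes on version B (the rewrite author's own statement) =====
-- stated objective: alternative
-- what changed: B first builds parallel lists of original indices and nondecreasing prefix sums of the non-negative elements, then binary-searches the prefix-sum list for the first sum strictly above u, instead of A's single guarded scan with a flag variable and post-loop -1 correction.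
-- intended difference: When u < 0 and s is empty or starts with a negative value, A returns the spurious index 0 (its initial res is never overwritten yet the final sum 0 exceeds u), while B returns the index at which the running sum of non-negative elements actually first exceeds u, or -1 if none does, which is the intended value. — e.g. on pos_umbral([-2, 3], -1): A returns 0, B returns 1
import Mathlib
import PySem

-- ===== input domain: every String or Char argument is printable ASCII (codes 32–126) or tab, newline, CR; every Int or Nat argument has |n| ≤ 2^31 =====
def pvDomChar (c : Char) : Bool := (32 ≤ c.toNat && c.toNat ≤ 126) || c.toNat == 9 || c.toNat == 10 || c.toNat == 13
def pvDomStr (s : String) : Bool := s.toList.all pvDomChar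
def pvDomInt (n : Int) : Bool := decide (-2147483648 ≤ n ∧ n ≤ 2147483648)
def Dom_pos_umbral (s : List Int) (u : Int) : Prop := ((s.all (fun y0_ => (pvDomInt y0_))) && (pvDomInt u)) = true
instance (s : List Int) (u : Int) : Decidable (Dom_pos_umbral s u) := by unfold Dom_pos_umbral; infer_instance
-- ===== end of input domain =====

-- B replaces A's guarded scan (flag variable res, post-loop -1 correction) by a two-phase
-- algorithm: build parallel lists of indices and nondecreasing prefix sums of the
-- non-negative elements, then binary-search the first prefix sum above u (objective: alternative).

-- ===== PORT A =====
def pos_umbral (s : List Int) (u : Int) : Int :=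
  let st := (PySem.List.pyRange 0 (PySem.List.len s) 1).foldl
    (fun (p : Int × Int) i =>
      if p.1 ≤ u ∧ PySem.List.pyGetD s i 0 ≥ 0 then
        (p.1 + PySem.List.pyGetD s i 0, i)
      else p)
    (0, 0)
  -- state p = (suma, res); final: if suma ≤ u then res = -1
  if st.1 ≤ u then -1 else st.2

-- ===== PORT B =====
-- phase 1: the 'for i, v in enumerate(s)' loop appending to idxs and pref; state (idxs, pref, t)
def pvBuild : List (Int × Int) → List Int × List Int × Int → List Int × List Int × Int
  | [], st => st
  | (i, v) :: t, (idxs, pref, tot) =>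
      if 0 ≤ v then pvBuild t (idxs ++ [i], pref ++ [tot + v], tot + v)
      else pvBuild t (idxs, pref, tot)

-- phase 2: the 'while lo < hi' binary-search loop
def pvBisect (pref : List Int) (u lo hi : Int) : Int :=
  if h : lo < hi then
    let mid := PySem.Int.floordiv (lo + hi) 2
    if u < PySem.List.pyGetD pref mid 0 then pvBisect pref u lo mid
    else pvBisect pref u (mid + 1) hi
  else lo
termination_by (hi - lo).toNat
decreasing_by
  · have := (PySem.Int.floordiv_lt_iff_lt_mul (a := lo + hi) (b := 2) (q := hi) (by omega)).mpr (by omega)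
    have := (PySem.Int.le_floordiv_iff_mul_le (a := lo + hi) (b := 2) (q := lo) (by omega)).mpr (by omega)
    omega
  · have := (PySem.Int.le_floordiv_iff_mul_le (a := lo + hi) (b := 2) (q := lo) (by omega)).mpr (by omega)
    omega

def pos_umbral_alt (s : List Int) (u : Int) : Int :=
  let st := pvBuild (PySem.List.enumerate s 0) ([], [], 0)
  let idxs := st.1
  let pref := st.2.1
  let lo := pvBisect pref u 0 (PySem.List.len pref)
  if lo < PySem.List.len idxs then PySem.List.pyGetD idxs lo 0 else -1

-- ===== PRECONDITION & SPEC =====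
-- When u < 0 and s is empty or starts with a negative value, A returns the spurious index 0
-- (its initial res is never overwritten and the final sum 0 already exceeds u), although no
-- prefix ending at index 0 was ever accumulated; B returns the index where the running sum of
-- non-negative elements actually first exceeds u (or -1), which is the intended value.
def D_pos_umbral (s : List Int) (u : Int) : Prop := u < 0 ∧ s.headD (-1) < 0
instance (s : List Int) (u : Int) : Decidable (D_pos_umbral s u) := by unfold D_pos_umbral; infer_instance

def Spec_pos_umbral (s : List Int) (u : Int) (out : Int) : Prop := ¬ D_pos_umbral s u → out = pos_umbral_alt s u
instance (s : List Int) (u : Int) (out : Int) : Decidable (Spec_pos_umbral s u out) := by unfold Spec_pos_umbral; infer_instance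

def pvDiffWitness_pos_umbral : List Int × Int := ([-2, 3], -1)
def pvDiffWitnessOut_pos_umbral : Int × Int := (0, 1)

-- ===== CLAIM (what is proved, stated in full; the proofs are below) =====
def Claim_unchanged_pos_umbral : Prop := ∀ (s : List Int) (u : Int), Dom_pos_umbral s u → Spec_pos_umbral s u (pos_umbral s u)
def Claim_changed_pos_umbral : Prop := Dom_pos_umbral (pvDiffWitness_pos_umbral.1) (pvDiffWitness_pos_umbral.2) ∧ D_pos_umbral (pvDiffWitness_pos_umbral.1) (pvDiffWitness_pos_umbral.2) ∧ pos_umbral (pvDiffWitness_pos_umbral.1) (pvDiffWitness_pos_umbral.2) = pvDiffWitnessOut_pos_umbral.1 ∧ pos_umbral_alt (pvDiffWitness_pos_umbral.1) (pvDiffWitness_pos_umbral.2) = pvDiffWitnessOut_pos_umbral.2 ∧ pvDiffWitnessOut_pos_umbral.1 ≠ pvDiffWitnessOut_pos_umbral.2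
def Claim_exact_pos_umbral : Prop := ∀ (s : List Int) (u : Int), Dom_pos_umbral s u → D_pos_umbral s u → pos_umbral s u ≠ pos_umbral_alt s u

-- ===== LEMMAS AND PROOFS =====

-- A's loop body on an (index, value) pair (used only in the proofs)
def pvStepG (u : Int) (p q : Int × Int) : Int × Int :=
  if p.1 ≤ u ∧ q.2 ≥ 0 then (p.1 + q.2, q.1) else p

-- a linear scan of (index, value) pairs with a running total (proof-side reference semantics)
def pvScan (u : Int) : List (Int × Int) → Int → Int
  | [], _ => -1
  | (i, v) :: t, total => if total + v > u then i else pvScan u t (total + v)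

-- prefix sums starting from tot (reference model of B's pref list)
def pvPref : List Int → Int → List Int
  | [], _ => []
  | v :: t, tot => (tot + v) :: pvPref t (tot + v)

-- once suma exceeds u, A's loop no longer changes its state
theorem pvStepG_frozen (u : Int) (l : List (Int × Int)) (p : Int × Int) (h : ¬ p.1 ≤ u) :
    l.foldl (pvStepG u) p = p := by
  induction l with
  | nil => rfl
  | cons q t ih => simp [pvStepG, h, ih]

-- rewrites A's fold over indices as a fold of pvStepG over enumerate s 0
theorem pos_umbral_eq_fold (s : List Int) (u : Int) :
    pos_umbral s u =
      (if ((PySem.List.enumerate s 0).foldl (pvStepG u) (0, 0)).1 ≤ u then -1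
       else ((PySem.List.enumerate s 0).foldl (pvStepG u) (0, 0)).2) := by
  rw [pos_umbral, PySem.List.enumerate_eq_map_pyRange s 0, List.foldl_map]
  rfl

-- the core invariant: while suma ≤ u, A's remaining loop equals the scan of the filtered pairs
theorem pvMain (u : Int) (l : List (Int × Int)) (res suma : Int) (h : suma ≤ u) :
    (if (l.foldl (pvStepG u) (suma, res)).1 ≤ u then -1
     else (l.foldl (pvStepG u) (suma, res)).2)
      = pvScan u (l.filter (fun p => 0 ≤ p.2)) suma := by
  induction l generalizing res suma with
  | nil => simp [pvScan, h]
  | cons q t ih =>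
    obtain ⟨i, v⟩ := q
    by_cases hv : 0 ≤ v
    · rw [List.foldl_cons, List.filter_cons_of_pos (by simp [hv])]
      have hstep : pvStepG u (suma, res) (i, v) = (suma + v, i) := by
        simp [pvStepG, h, hv]
      rw [hstep]
      by_cases hs : suma + v ≤ u
      · rw [ih i (suma + v) hs]
        simp [pvScan, not_lt.mpr hs]
      · rw [pvStepG_frozen u t (suma + v, i) hs]
        simp [pvScan, hs, lt_of_not_ge hs]
    · have : pvStepG u (suma, res) (i, v) = (suma, res) := by
        simp [pvStepG, not_le.mp (by simpa using hv)]
      rw [List.foldl_cons, this, ih res suma h,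
        List.filter_cons_of_neg (by simpa using hv)]

-- the scan returns -1 or the index of one of its pairs
theorem pvScan_cases (u : Int) (l : List (Int × Int)) (total : Int) :
    pvScan u l total = -1 ∨ ∃ p ∈ l, pvScan u l total = p.1 := by
  induction l generalizing total with
  | nil => exact Or.inl rfl
  | cons q t ih =>
    obtain ⟨i, v⟩ := q
    rw [pvScan]
    split
    · exact Or.inr ⟨(i, v), List.mem_cons_self, rfl⟩
    · rcases ih (total + v) with h | ⟨p, hp, he⟩
      · exact Or.inl h
      · exact Or.inr ⟨p, List.mem_cons_of_mem _ hp, he⟩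

theorem pvPref_length (vs : List Int) (tot : Int) : (pvPref vs tot).length = vs.length := by
  induction vs generalizing tot with
  | nil => rfl
  | cons v t ih => simp [pvPref, ih]

-- B's build loop produces exactly the filtered index list and the prefix sums of the values
theorem pvBuild_eq (l : List (Int × Int)) : ∀ (idxs pref : List Int) (tot : Int),
    pvBuild l (idxs, pref, tot) =
      (idxs ++ (l.filter (fun p => 0 ≤ p.2)).map Prod.fst,
       pref ++ pvPref ((l.filter (fun p => 0 ≤ p.2)).map Prod.snd) tot,
       tot + ((l.filter (fun p => 0 ≤ p.2)).map Prod.snd).sum) := by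
  induction l with
  | nil => intro idxs pref tot; simp [pvBuild, pvPref]
  | cons q t ih =>
    intro idxs pref tot
    obtain ⟨i, v⟩ := q
    by_cases hv : 0 ≤ v
    · rw [List.filter_cons_of_pos (by simp [hv])]
      simp only [pvBuild, if_pos hv, ih]
      simp [pvPref]
      omega
    · rw [List.filter_cons_of_neg (by simpa using hv)]
      simp only [pvBuild, if_neg hv, ih]

-- stepwise monotonicity ⇒ monotonicity
theorem pvMonoOfStep (f : Nat → Int) (n : Nat) (h : ∀ m, m + 1 < n → f m ≤ f (m + 1)) :
    ∀ j k : Nat, j ≤ k → k < n → f j ≤ f k := by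
  intro j k hjk hk
  induction k with
  | zero => have : j = 0 := by omega
            simp [this]
  | succ k ih =>
    rcases Nat.lt_or_ge j (k + 1) with hj | hj
    · exact le_trans (ih (by omega) (by omega)) (h k hk)
    · have : j = k + 1 := by omega
      simp [this]

-- adjacent prefix sums are nondecreasing when all values are non-negative
theorem pvPref_step (vs : List Int) : ∀ (tot : Int), (∀ v ∈ vs, 0 ≤ v) → ∀ k : Nat,
    k + 1 < vs.length → (pvPref vs tot).getD k 0 ≤ (pvPref vs tot).getD (k + 1) 0 := by
  induction vs with
  | nil => intro tot _ k hk; simp at hk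
  | cons v t ih =>
    intro tot hpos k hk
    match k with
    | 0 =>
      have ht : t ≠ [] := by
        intro h; rw [h] at hk; simp at hk
      match t, ht with
      | w :: t', _ =>
        have hw : 0 ≤ w := hpos w (by simp)
        simp [pvPref]
        omega
    | Nat.succ k' =>
      have := ih (tot + v) (fun w hw => hpos w (List.mem_cons_of_mem _ hw)) k' (by simpa using hk)
      simpa [pvPref] using this

theorem pvPref_mono (vs : List Int) (tot : Int) (hpos : ∀ v ∈ vs, 0 ≤ v) :
    ∀ j k : Nat, j ≤ k → k < vs.length →
      (pvPref vs tot).getD j 0 ≤ (pvPref vs tot).getD k 0 := by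
  have := pvMonoOfStep (fun k => (pvPref vs tot).getD k 0) vs.length (pvPref_step vs tot hpos)
  exact this

-- the binary search returns the least position whose prefix sum exceeds u
theorem pvBisect_spec (pref : List Int) (u : Int)
    (mono : ∀ j k : Nat, j ≤ k → k < pref.length → pref.getD j 0 ≤ pref.getD k 0) :
    ∀ (n : Nat) (lo hi : Int), (hi - lo).toNat = n → 0 ≤ lo → lo ≤ hi → hi ≤ (pref.length : Int) →
    (∀ k : Nat, (k : Int) < lo → pref.getD k 0 ≤ u) →
    (∀ k : Nat, hi ≤ (k : Int) → k < pref.length → u < pref.getD k 0) →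
    lo ≤ pvBisect pref u lo hi ∧ pvBisect pref u lo hi ≤ hi ∧
    (∀ k : Nat, (k : Int) < pvBisect pref u lo hi → pref.getD k 0 ≤ u) ∧
    (pvBisect pref u lo hi < (pref.length : Int) → u < pref.getD (pvBisect pref u lo hi).toNat 0) := by
  intro n
  induction n using Nat.strong_induction_on with
  | _ n IH =>
    intro lo hi hn h0 hlh hhi hlo hhiP
    rw [pvBisect]
    by_cases hlt : lo < hi
    · rw [dif_pos hlt]
      have hmid1 : lo ≤ PySem.Int.floordiv (lo + hi) 2 :=
        (PySem.Int.le_floordiv_iff_mul_le (a := lo + hi) (b := 2) (q := lo) (by omega)).mpr (by omega)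
      have hmid2 : PySem.Int.floordiv (lo + hi) 2 < hi :=
        (PySem.Int.floordiv_lt_iff_lt_mul (a := lo + hi) (b := 2) (q := hi) (by omega)).mpr (by omega)
      set mid := PySem.Int.floordiv (lo + hi) 2 with hmid
      have hmr : 0 ≤ mid ∧ mid < (pref.length : Int) := ⟨by omega, by omega⟩
      have hget : PySem.List.pyGetD pref mid 0 = pref.getD mid.toNat 0 := by
        rw [PySem.List.pyGetD_eq_getElem pref (i := mid) 0 hmr.1 (by simpa using hmr.2)]
        rw [List.getD_eq_getElem pref 0 (by omega)]
      by_cases hc : u < PySem.List.pyGetD pref mid 0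
      · rw [if_pos hc]
        have hhi' : ∀ k : Nat, mid ≤ (k : Int) → k < pref.length → u < pref.getD k 0 := by
          intro k hk1 hk2
          have h1 : pref.getD mid.toNat 0 ≤ pref.getD k 0 := mono mid.toNat k (by omega) hk2
          rw [hget] at hc
          omega
        obtain ⟨a1, a2, a3, a4⟩ :=
          IH ((mid - lo).toNat) (by omega) lo mid rfl h0 (by omega) (by omega) hlo hhi'
        exact ⟨a1, by omega, a3, a4⟩
      · rw [if_neg hc]
        have hlo' : ∀ k : Nat, (k : Int) < mid + 1 → pref.getD k 0 ≤ u := by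
          intro k hk
          have h1 : pref.getD k 0 ≤ pref.getD mid.toNat 0 :=
            mono k mid.toNat (by omega) (by omega)
          rw [hget] at hc
          omega
        obtain ⟨a1, a2, a3, a4⟩ :=
          IH ((hi - (mid + 1)).toNat) (by omega) (mid + 1) hi rfl (by omega) (by omega) (by omega) hlo' hhiP
        exact ⟨by omega, a2, a3, a4⟩
    · rw [dif_neg hlt]
      have heq : lo = hi := by omega
      refine ⟨le_refl _, by omega, hlo, ?_⟩
      intro hlen
      have := hhiP lo.toNat (by omega) (by omega)
      simpa [Int.toNat_of_nonneg h0] using this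

-- a scan equals indexing with any position satisfying the first-exceed bounds
theorem pvScan_of_bounds (u : Int) (l : List (Int × Int)) : ∀ (tot r : Int),
    0 ≤ r → r ≤ (l.length : Int) →
    (∀ k : Nat, (k : Int) < r → (pvPref (l.map Prod.snd) tot).getD k 0 ≤ u) →
    (r < (l.length : Int) → u < (pvPref (l.map Prod.snd) tot).getD r.toNat 0) →
    pvScan u l tot = if r < (l.length : Int) then (l.map Prod.fst).getD r.toNat 0 else -1 := by
  induction l with
  | nil =>
    intro tot r h0 h1 _ _
    simp [pvScan]
    omega
  | cons q t ih =>
    intro tot r h0 h1 hle hgt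
    obtain ⟨i, v⟩ := q
    by_cases hr : r = 0
    · subst hr
      have hx := hgt (by simp)
      simp [pvPref] at hx
      rw [pvScan, if_pos (by omega)]
      simp
    · have h00 := hle 0 (by omega)
      simp [pvPref] at h00
      rw [pvScan, if_neg (by omega)]
      have hr1 : 1 ≤ r := by omega
      rw [ih (tot + v) (r - 1) (by omega) (by simp at h1 ⊢; omega) ?_ ?_]
      · by_cases hc : r - 1 < (t.length : Int)
        · rw [if_pos hc, if_pos (by simp only [List.length_cons]; push_cast; omega)]
          have ht : r.toNat = (r - 1).toNat + 1 := by omega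
          rw [List.map_cons, ht, List.getD_cons_succ]
        · rw [if_neg hc, if_neg (by simp only [List.length_cons]; push_cast at hc ⊢; omega)]
      · intro k hk
        have := hle (k + 1) (by push_cast; omega)
        simpa [pvPref] using this
      · intro hlt
        have := hgt (by simp at hlt ⊢; omega)
        have ht : r.toNat = (r - 1).toNat + 1 := by omega
        rw [ht] at this
        simpa [pvPref] using this

-- everything together: B equals the reference scan of the filtered pairs
theorem pvAlt_eq_scan (s : List Int) (u : Int) :
    pos_umbral_alt s u = pvScan u ((PySem.List.enumerate s 0).filter (fun p => 0 ≤ p.2)) 0 := by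
  rw [pos_umbral_alt]
  set pares := (PySem.List.enumerate s 0).filter (fun p => 0 ≤ p.2) with hp
  have hbuild := pvBuild_eq (PySem.List.enumerate s 0) [] [] 0
  rw [← hp] at hbuild
  simp only [hbuild, List.nil_append]
  set pref := pvPref (pares.map Prod.snd) 0 with hpref
  have hlenp : pref.length = pares.length := by
    rw [hpref, pvPref_length, List.length_map]
  have hpos : ∀ v ∈ pares.map Prod.snd, 0 ≤ v := by
    intro v hv
    rw [List.mem_map] at hv
    obtain ⟨p, hp1, hp2⟩ := hv
    have := List.of_mem_filter hp1
    simp at this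
    omega
  have hmono := pvPref_mono (pares.map Prod.snd) 0 hpos
  rw [← hpref] at hmono
  simp only [List.length_map] at hmono
  have hspec := pvBisect_spec pref u (by intro j k hjk hk; exact hmono j k hjk (by omega))
    (((pref.length : Int) - 0).toNat) 0 (pref.length : Int) rfl (by omega) (by omega) (by omega)
    (by intro k hk; omega) (by intro k hk1 hk2; omega)
  simp only [PySem.List.len_eq] at *
  obtain ⟨hr0, hr1, hrle, hrgt⟩ := hspec
  set r := pvBisect pref u 0 (pref.length : Int) with hr
  rw [pvScan_of_bounds u pares 0 r hr0 (by omega) (by intro k hk; exact hrle k hk)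
    (by intro h; exact hrgt (by omega))]
  have hlen2 : ((pares.map Prod.fst).length : Int) = (pares.length : Int) := by simp
  by_cases hc : r < (pares.length : Int)
  · rw [if_pos hc, if_pos (by simp; omega)]
    rw [PySem.List.pyGetD_eq_getElem _ (i := r) 0 hr0 (by simp; omega),
      List.getD_eq_getElem _ 0 (by simp; omega)]
  · rw [if_neg hc, if_neg (by simp; omega)]

-- ===== VERDICT (by name: the statements are the Claim_ definitions above) =====
theorem pos_umbral_spec : Claim_unchanged_pos_umbral := by
  intro s u _ hD
  rw [pos_umbral_eq_fold, pvAlt_eq_scan]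
  by_cases hu : 0 ≤ u
  · exact pvMain u _ 0 0 hu
  · unfold D_pos_umbral at hD
    push Not at hD
    have hu' : u < 0 := lt_of_not_ge hu
    match s, hD hu' with
    | x :: t, hx =>
      have hx' : (0:Int) ≤ x := by simpa using hx
      rw [pvStepG_frozen u _ _ (by simpa using hu)]
      rw [PySem.List.enumerate_cons, List.filter_cons_of_pos (by simp [hx'])]
      simp [pvScan, hu, show ¬ x ≤ u by omega]

theorem pos_umbral_changed : Claim_changed_pos_umbral := by
  unfold Claim_changed_pos_umbral
  refine ⟨by decide, by decide, by decide, ?_, by decide⟩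
  rw [pvAlt_eq_scan]
  decide

theorem pos_umbral_tight : Claim_exact_pos_umbral := by
  intro s u _ hD
  obtain ⟨hu, hh⟩ := hD
  rw [pos_umbral_eq_fold, pvAlt_eq_scan]
  rw [pvStepG_frozen u _ _ (by simpa using not_le.mpr hu)]
  simp only [not_le.mpr hu, if_false]
  match s, hh with
  | [], _ => simp [PySem.List.enumerate, pvScan]
  | x :: t, hx =>
    have hx' : x < 0 := by simpa using hx
    rw [PySem.List.enumerate_cons, List.filter_cons_of_neg (by simp; omega)]
    rcases pvScan_cases u ((PySem.List.enumerate t (0 + 1)).filter (fun p => 0 ≤ p.2)) 0 with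
      h | ⟨p, hp, he⟩
    · rw [h]; decide
    · rw [he]
      have hp' := List.mem_of_mem_filter hp
      rw [PySem.List.mem_enumerate_iff] at hp'
      obtain ⟨k, _, hpk⟩ := hp'
      subst hpk
      simp; omega
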